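-- pv_equiv track=rewrite | github.com/zazabap/problem-reductions | docs/paper/verify-reductions/verify_k_coloring_partition_into_cliques.py | is_valid_clique_partition
-- ===== SOURCE A (Python) =====
-- def is_valid_clique_partition(n, edges, k, config):
--     """Check if config is a valid partition into <= k cliques."""
--     if len(config) != n:
--         return False
--     if any(c < 0 or c >= k for c in config):
--         return False
--     edge_set = set()
--     for u, v in edges:
--         edge_set.add((min(u, v), max(u, v)))
--     for group in range(k):
--         members = [v for v in range(n) if config[v] == group]
--         for i in range(len(members)):
--             for j in range(i + 1, len(members)):
--                 u, v = members[i], members[j]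
--                 if (min(u, v), max(u, v)) not in edge_set:
--                     return False
--     return True
-- ===== SOURCE B (Python) =====
-- def is_valid_clique_partition(n, edges, k, config):
--     """Check if config is a valid partition into <= k cliques.
--
--     Counting version: instead of scanning all k groups and testing every
--     member pair, count the distinct intra-group edges per color once and
--     compare each count to C(group_size, 2)."""
--     if len(config) != n:
--         return False
--     if any(c < 0 or c >= k for c in config):
--         return False
--     sizes = {}
--     for c in config:
--         sizes[c] = sizes.get(c, 0) + 1
--     intra = set()
--     for u, v in edges:
--         a, b = (u, v) if u <= v else (v, u)
--         if 0 <= a and b < n and a != b and config[a] == config[b]: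
--             intra.add((a, b))
--     counts = {}
--     for a, b in intra:
--         c = config[a]
--         counts[c] = counts.get(c, 0) + 1
--     for c, s in sizes.items():
--         if counts.get(c, 0) * 2 != s * (s - 1):
--             return False
--     return True
-- ===== Notes on version B (the rewrite author's own statement) =====
-- stated objective: alternative
-- what changed: Replaces the scan over all k color groups with nested all-pairs membership tests by a single pass that counts group sizes and distinct intra-color edges per color, accepting iff each color's edge count equals C(size,2).
import Mathlib
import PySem

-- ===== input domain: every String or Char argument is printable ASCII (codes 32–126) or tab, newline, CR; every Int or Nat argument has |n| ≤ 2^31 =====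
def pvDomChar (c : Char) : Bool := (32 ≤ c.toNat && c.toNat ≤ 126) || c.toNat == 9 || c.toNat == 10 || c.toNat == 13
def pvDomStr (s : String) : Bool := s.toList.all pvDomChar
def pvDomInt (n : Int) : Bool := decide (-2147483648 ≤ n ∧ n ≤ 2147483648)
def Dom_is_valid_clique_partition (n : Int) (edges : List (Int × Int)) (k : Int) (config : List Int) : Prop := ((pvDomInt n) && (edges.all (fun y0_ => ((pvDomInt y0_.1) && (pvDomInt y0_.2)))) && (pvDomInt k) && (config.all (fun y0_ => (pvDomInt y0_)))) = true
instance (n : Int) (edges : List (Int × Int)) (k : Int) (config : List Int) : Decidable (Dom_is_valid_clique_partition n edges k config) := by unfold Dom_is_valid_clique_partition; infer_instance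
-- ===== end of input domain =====

-- B replaces A's scan over all k color groups (each with an all-pairs membership test)
-- by one pass counting group sizes and distinct intra-color edges, comparing each
-- per-color edge count to C(size, 2); equivalence of the two is proved below.


-- ===== PORT A =====
def is_valid_clique_partition (n : Int) (edges : List (Int × Int)) (k : Int) (config : List Int) : Bool :=
  if (config.length : Int) ≠ n then false
  else if config.any (fun c => decide (c < 0) || decide (k ≤ c)) then false
  else
    let edge_set : PySem.Set (Int × Int) :=
      edges.foldl (fun s e => PySem.Set.add s (min e.1 e.2, max e.1 e.2)) PySem.Set.empty
    (PySem.List.pyRange 0 k 1).all (fun g =>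
      let members := (PySem.List.pyRange 0 n 1).filter
        (fun v => PySem.List.pyGetD config v 0 == g)
      (PySem.List.pyRange 0 (members.length : Int) 1).all (fun i =>
        (PySem.List.pyRange (i + 1) (members.length : Int) 1).all (fun j =>
          let u := PySem.List.pyGetD members i 0
          let v := PySem.List.pyGetD members j 0
          PySem.Set.contains edge_set (min u v, max u v))))

-- ===== PORT B =====
def is_valid_clique_partition_alt (n : Int) (edges : List (Int × Int)) (k : Int) (config : List Int) : Bool :=
  if (config.length : Int) ≠ n then false
  else if config.any (fun c => decide (c < 0) || decide (k ≤ c)) then false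
  else
    let sizes : PySem.Dict Int Int :=
      config.foldl (fun d c => d.insert c (d.getD c 0 + 1)) PySem.Dict.empty
    let intra : PySem.Set (Int × Int) :=
      edges.foldl (fun s e =>
        let p := if e.1 ≤ e.2 then (e.1, e.2) else (e.2, e.1)
        if decide (0 ≤ p.1) && decide (p.2 < n) && !(p.1 == p.2)
            && (PySem.List.pyGetD config p.1 0 == PySem.List.pyGetD config p.2 0)
        then PySem.Set.add s p else s) PySem.Set.empty
    let counts : PySem.Dict Int Int :=
      intra.foldl (fun d p =>
        d.insert (PySem.List.pyGetD config p.1 0)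
          (d.getD (PySem.List.pyGetD config p.1 0) 0 + 1)) PySem.Dict.empty
    (PySem.Dict.items sizes).all (fun cs =>
      counts.getD cs.1 0 * 2 == cs.2 * (cs.2 - 1))

-- ===== PRECONDITION & SPEC =====
def Spec_is_valid_clique_partition (n : Int) (edges : List (Int × Int)) (k : Int) (config : List Int) (out : Bool) : Prop := out = is_valid_clique_partition_alt n edges k config
instance (n : Int) (edges : List (Int × Int)) (k : Int) (config : List Int) (out : Bool) : Decidable (Spec_is_valid_clique_partition n edges k config out) := by unfold Spec_is_valid_clique_partition; infer_instance

-- ===== CLAIM (what is proved, stated in full; the proofs are below) =====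
def Claim_equal_is_valid_clique_partition : Prop := ∀ (n : Int) (edges : List (Int × Int)) (k : Int) (config : List Int), Dom_is_valid_clique_partition n edges k config → Spec_is_valid_clique_partition n edges k config (is_valid_clique_partition n edges k config)

-- ===== LEMMAS AND PROOFS =====

-- the color of vertex v
def pvCol (config : List Int) (v : Int) : Int := PySem.List.pyGetD config v 0

-- normalized edge list (A's edge_set contents, B's candidate pairs)
def pvNorm (edges : List (Int × Int)) : List (Int × Int) :=
  edges.map (fun e => (min e.1 e.2, max e.1 e.2))

-- the members of color group c (A's `members`)
def pvMembers (config : List Int) (c : Int) : List Int :=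
  (PySem.List.pyRange 0 (config.length : Int) 1).filter
    (fun v => PySem.List.pyGetD config v 0 == c)

-- all ordered index pairs of a list, as value pairs
def pvPairs : List Int → List (Int × Int)
  | [] => []
  | x :: xs => xs.map (fun y => (x, y)) ++ pvPairs xs

theorem pvPairs_length (m : List Int) :
    (m.length : Int) * ((m.length : Int) - 1) = 2 * ((pvPairs m).length : Int) := by
  induction m with
  | nil => simp [pvPairs]
  | cons x xs ih =>
    simp only [pvPairs, List.length_cons, List.length_append, List.length_map]
    push_cast
    push_cast at ih
    linear_combination ih

theorem pvPairs_forall (m : List Int) (P : Int → Int → Prop) :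
    (∀ x ∈ pvPairs m, P x.1 x.2) ↔ m.Pairwise P := by
  induction m with
  | nil => simp [pvPairs]
  | cons x xs ih =>
    simp only [pvPairs, List.mem_append, List.mem_map, List.pairwise_cons, ← ih]
    constructor
    · intro h
      exact ⟨fun y hy => h (x, y) (Or.inl ⟨y, hy, rfl⟩),
             fun p hp => h p (Or.inr hp)⟩
    · rintro ⟨h1, h2⟩ p hp
      rcases hp with ⟨y, hy, rfl⟩ | hp
      · exact h1 y hy
      · exact h2 p hp

theorem pvPairs_mem_iff (m : List Int) (hm : m.Pairwise (· < ·)) (x : Int × Int) :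
    x ∈ pvPairs m ↔ x.1 ∈ m ∧ x.2 ∈ m ∧ x.1 < x.2 := by
  induction m with
  | nil => simp [pvPairs]
  | cons a xs ih =>
    rw [List.pairwise_cons] at hm
    obtain ⟨ha, hxs⟩ := hm
    simp only [pvPairs, List.mem_append, List.mem_map, List.mem_cons, ih hxs]
    constructor
    · rintro (⟨y, hy, rfl⟩ | ⟨h1, h2, h3⟩)
      · exact ⟨Or.inl rfl, Or.inr hy, ha y hy⟩
      · exact ⟨Or.inr h1, Or.inr h2, h3⟩
    · rintro ⟨h1 | h1, h2 | h2, h3⟩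
      · omega
      · exact Or.inl ⟨x.2, h2, by simp [h1.symm]⟩
      · exact absurd (ha x.1 h1) (by omega)
      · exact Or.inr ⟨h1, h2, h3⟩

theorem pvPairs_nodup (m : List Int) (hm : m.Pairwise (· < ·)) :
    (pvPairs m).Nodup := by
  induction m with
  | nil => simp [pvPairs]
  | cons a xs ih =>
    rw [List.pairwise_cons] at hm
    obtain ⟨ha, hxs⟩ := hm
    have hnd : xs.Nodup := hxs.imp (fun h => by omega)
    refine List.Nodup.append ?_ (ih hxs) ?_
    · exact hnd.map (fun y z h => by simpa using congrArg Prod.snd h)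
    · intro p hp hp2
      rcases List.mem_map.1 hp with ⟨y, hy, rfl⟩
      rcases (pvPairs_mem_iff xs hxs _).1 hp2 with ⟨h1, _, _⟩
      exact absurd (ha _ h1) (by simp)

-- the per-color counting argument
theorem pvColorKey (E : List (Int × Int)) (m : List Int) (I : List (Int × Int))
    (hE : ∀ x ∈ E, x.1 ≤ x.2)
    (hm : m.Pairwise (· < ·))
    (hI : I.Nodup)
    (hImem : ∀ x, x ∈ I ↔ x ∈ E ∧ x.1 ∈ m ∧ x.2 ∈ m ∧ x.1 ≠ x.2) :
    m.Pairwise (fun a b => (a, b) ∈ E) ↔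
      2 * (I.length : Int) = (m.length : Int) * ((m.length : Int) - 1) := by
  have sub1 : I ⊆ pvPairs m := by
    intro x hx
    obtain ⟨h0, h1, h2, h3⟩ := (hImem x).1 hx
    exact (pvPairs_mem_iff m hm x).2 ⟨h1, h2, lt_of_le_of_ne (hE x h0) h3⟩
  constructor
  · intro H
    have sub2 : pvPairs m ⊆ I := by
      intro x hx
      obtain ⟨h1, h2, h3⟩ := (pvPairs_mem_iff m hm x).1 hx
      have hxE : (x.1, x.2) ∈ E := (pvPairs_forall m _).2 H x hx
      exact (hImem x).2 ⟨by simpa using hxE, h1, h2, by omega⟩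
    have e1 : I.length = (pvPairs m).length :=
      le_antisymm (hI.subperm sub1).length_le ((pvPairs_nodup m hm).subperm sub2).length_le
    have := pvPairs_length m
    omega
  · intro Hlen
    have hpl := pvPairs_length m
    have hlen2 : (pvPairs m).length ≤ I.length := by omega
    have hperm : List.Perm I (pvPairs m) := (hI.subperm sub1).perm_of_length_le hlen2
    refine (pvPairs_forall m _).1 ?_
    intro x hx
    have hxI : x ∈ I := hperm.mem_iff.2 hx
    have := ((hImem x).1 hxI).1
    simpa using this

-- the intra-color edge set B builds (identical to the fold in the port of B)
def pvIntra (n : Int) (config : List Int) (edges : List (Int × Int)) : PySem.Set (Int × Int) :=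
  edges.foldl (fun s e =>
    let p := if e.1 ≤ e.2 then (e.1, e.2) else (e.2, e.1)
    if decide (0 ≤ p.1) && decide (p.2 < n) && !(p.1 == p.2)
        && (PySem.List.pyGetD config p.1 0 == PySem.List.pyGetD config p.2 0)
    then PySem.Set.add s p else s) PySem.Set.empty

theorem pvNormB_eq (e : Int × Int) :
    (if e.1 ≤ e.2 then (e.1, e.2) else (e.2, e.1)) = (min e.1 e.2, max e.1 e.2) := by
  split <;> simp [Prod.ext_iff, min_def, max_def] <;> omega

theorem pvIntraFold_mem (n : Int) (config : List Int) (edges : List (Int × Int))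
    (s : PySem.Set (Int × Int)) (x : Int × Int) :
    x ∈ edges.foldl (fun s e =>
        let p := if e.1 ≤ e.2 then (e.1, e.2) else (e.2, e.1)
        if decide (0 ≤ p.1) && decide (p.2 < n) && !(p.1 == p.2)
            && (PySem.List.pyGetD config p.1 0 == PySem.List.pyGetD config p.2 0)
        then PySem.Set.add s p else s) s
      ↔ x ∈ s ∨ (x ∈ pvNorm edges ∧ 0 ≤ x.1 ∧ x.2 < n ∧ x.1 ≠ x.2
          ∧ pvCol config x.1 = pvCol config x.2) := by
  induction edges generalizing s with
  | nil => simp [pvNorm]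
  | cons e es ih =>
    rw [List.foldl_cons, ih]
    simp only [pvNormB_eq e, pvNorm, List.map_cons, List.mem_cons]
    by_cases hc : 0 ≤ min e.1 e.2 ∧ max e.1 e.2 < n ∧ min e.1 e.2 ≠ max e.1 e.2
        ∧ pvCol config (min e.1 e.2) = pvCol config (max e.1 e.2)
    · rw [if_pos (by simp [pvCol] at hc ⊢; tauto)]
      rw [PySem.Set.mem_add]
      constructor
      · rintro ((hx | rfl) | h)
        · exact Or.inl hx
        · exact Or.inr ⟨Or.inl rfl, hc⟩
        · exact Or.inr ⟨Or.inr h.1, h.2⟩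
      · rintro (hx | ⟨rfl | hmem, hC⟩)
        · exact Or.inl (Or.inl hx)
        · exact Or.inl (Or.inr rfl)
        · exact Or.inr ⟨hmem, hC⟩
    · rw [if_neg (by simp [pvCol] at hc ⊢; tauto)]
      constructor
      · rintro (hx | h)
        · exact Or.inl hx
        · exact Or.inr ⟨Or.inr h.1, h.2⟩
      · rintro (hx | ⟨rfl | hmem, hC⟩)
        · exact Or.inl hx
        · exact absurd hC hc
        · exact Or.inr ⟨hmem, hC⟩

theorem pvIntraFold_nodup (n : Int) (config : List Int) (edges : List (Int × Int))
    (s : PySem.Set (Int × Int)) (hs : s.Nodup) :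
    (edges.foldl (fun s e =>
        let p := if e.1 ≤ e.2 then (e.1, e.2) else (e.2, e.1)
        if decide (0 ≤ p.1) && decide (p.2 < n) && !(p.1 == p.2)
            && (PySem.List.pyGetD config p.1 0 == PySem.List.pyGetD config p.2 0)
        then PySem.Set.add s p else s) s).Nodup := by
  induction edges generalizing s with
  | nil => simpa
  | cons e es ih =>
    rw [List.foldl_cons]
    apply ih
    dsimp only
    split <;> split <;> first | exact PySem.Set.nodup_add _ _ hs | exact hs

-- A's nested index loops over a list are exactly Pairwise
theorem pvAllPairs_iff (m : List Int) (f : Int → Int → Bool) :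
    ((PySem.List.pyRange 0 (m.length : Int) 1).all (fun i =>
      (PySem.List.pyRange (i + 1) (m.length : Int) 1).all (fun j =>
        f (PySem.List.pyGetD m i 0) (PySem.List.pyGetD m j 0))) = true)
      ↔ m.Pairwise (fun a b => f a b = true) := by
  rw [List.pairwise_iff_getElem]
  simp only [List.all_eq_true, PySem.List.mem_pyRange_one]
  constructor
  · intro H i j hi hj hij
    have h1 := H (i : Int) ⟨by omega, by omega⟩ (j : Int) ⟨by omega, by omega⟩
    simp only [PySem.List.pyGetD_natCast] at h1
    rwa [List.getD_eq_getElem _ _ hi, List.getD_eq_getElem _ _ hj] at h1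
  · intro H i hi j hj
    obtain ⟨hi0, hi1⟩ := hi
    obtain ⟨hj0, hj1⟩ := hj
    have ei : i = (i.toNat : Int) := by omega
    have ej : j = (j.toNat : Int) := by omega
    rw [ei, ej, PySem.List.pyGetD_natCast, PySem.List.pyGetD_natCast,
        List.getD_eq_getElem _ _ (by omega), List.getD_eq_getElem _ _ (by omega)]
    exact H i.toNat j.toNat (by omega) (by omega) (by omega)

theorem pvPairwise_congr (m : List Int) (hm : m.Pairwise (· < ·))
    {P Q : Int → Int → Prop} (h : ∀ a b, a < b → (P a b ↔ Q a b)) :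
    m.Pairwise P ↔ m.Pairwise Q := by
  rw [List.pairwise_iff_getElem, List.pairwise_iff_getElem] at *
  constructor <;> intro H i j hi hj hij
  · exact (h _ _ (hm i j hi hj hij)).1 (H i j hi hj hij)
  · exact (h _ _ (hm i j hi hj hij)).2 (H i j hi hj hij)

theorem pvMembers_pairwise (config : List Int) (c : Int) :
    (pvMembers config c).Pairwise (· < ·) :=
  (PySem.List.pairwise_lt_pyRange_one 0 (config.length : Int)).filter _

theorem pvMembers_mem (config : List Int) (c v : Int) :
    v ∈ pvMembers config c ↔ 0 ≤ v ∧ v < (config.length : Int) ∧ pvCol config v = c := by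
  simp [pvMembers, List.mem_filter, PySem.List.mem_pyRange_one, pvCol, and_assoc]

theorem pvCountMap {α : Type} (l : List α) (f : α → Int) (c : Int) :
    (l.map f).count c = (l.filter (fun x => f x == c)).length := by
  induction l with
  | nil => simp
  | cons a l ih =>
    rw [List.map_cons, List.count_cons, List.filter_cons, ih]
    by_cases h : f a = c <;> simp [h]

theorem pvMembers_length (config : List Int) (c : Int) :
    (pvMembers config c).length = config.count c := by
  conv_rhs => rw [← PySem.List.map_pyGetD_pyRange_zero' config 0]
  rw [pvCountMap]
  rfl

theorem pvNorm_le (edges : List (Int × Int)) (x : Int × Int) (hx : x ∈ pvNorm edges) :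
    x.1 ≤ x.2 := by
  rcases List.mem_map.1 hx with ⟨e, _, rfl⟩
  exact min_le_max

-- per color: A's all-pairs condition equals B's counting condition
theorem pvCountsEq (l : List (Int × Int)) (config : List Int) :
    l.foldl (fun d p => d.insert (PySem.List.pyGetD config p.1 0)
        (d.getD (PySem.List.pyGetD config p.1 0) 0 + 1)) PySem.Dict.empty
      = PySem.Dict.counter (l.map (fun p => PySem.List.pyGetD config p.1 0)) := by
  rw [← PySem.Dict.foldl_insert_getD_add_one_eq_counter, List.foldl_map]

theorem pvPerColor (config : List Int) (edges : List (Int × Int)) (c : Int) :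
    (pvMembers config c).Pairwise (fun a b => (min a b, max a b) ∈ pvNorm edges) ↔
      (((pvIntra (config.length : Int) config edges).filter
          (fun x => PySem.List.pyGetD config x.1 0 == c)).length : Int) * 2
        = (config.count c : Int) * ((config.count c : Int) - 1) := by
  have hm := pvMembers_pairwise config c
  have hcong := pvPairwise_congr (pvMembers config c) hm
    (P := fun a b => (min a b, max a b) ∈ pvNorm edges)
    (Q := fun a b => (a, b) ∈ pvNorm edges)
    (fun a b hab => by
      show (min a b, max a b) ∈ pvNorm edges ↔ (a, b) ∈ pvNorm edges
      rw [min_eq_left hab.le, max_eq_right hab.le])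
  rw [hcong]
  have hnodup : ((pvIntra (config.length : Int) config edges).filter
      (fun x => PySem.List.pyGetD config x.1 0 == c)).Nodup :=
    (pvIntraFold_nodup (config.length : Int) config edges PySem.Set.empty
      (by simp [PySem.Set.empty])).filter _
  have hmem : ∀ x, x ∈ (pvIntra (config.length : Int) config edges).filter
      (fun x => PySem.List.pyGetD config x.1 0 == c)
      ↔ x ∈ pvNorm edges ∧ x.1 ∈ pvMembers config c ∧ x.2 ∈ pvMembers config c ∧ x.1 ≠ x.2 := by
    intro x
    rw [List.mem_filter]
    constructor
    · rintro ⟨hin, hcfst⟩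
      rcases (pvIntraFold_mem (config.length : Int) config edges PySem.Set.empty x).1 hin with
        h | ⟨hE, h1, h2, h3, h4⟩
      · simp [PySem.Set.empty] at h
      · have hle := pvNorm_le edges x hE
        have hc1 : pvCol config x.1 = c := by simpa [pvCol] using hcfst
        exact ⟨hE, (pvMembers_mem _ _ _).2 ⟨h1, by omega, hc1⟩,
               (pvMembers_mem _ _ _).2 ⟨by omega, h2, by rw [← h4]; exact hc1⟩, h3⟩
    · rintro ⟨hE, h1, h2, hne⟩
      obtain ⟨a1, a2, a3⟩ := (pvMembers_mem _ _ _).1 h1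
      obtain ⟨b1, b2, b3⟩ := (pvMembers_mem _ _ _).1 h2
      refine ⟨(pvIntraFold_mem (config.length : Int) config edges PySem.Set.empty x).2
        (Or.inr ⟨hE, a1, b2, hne, by rw [a3, b3]⟩), ?_⟩
      simp only [pvCol] at a3
      simp [a3]
  have hkey := pvColorKey (pvNorm edges) (pvMembers config c)
      ((pvIntra (config.length : Int) config edges).filter
        (fun x => PySem.List.pyGetD config x.1 0 == c))
      (pvNorm_le edges) hm hnodup hmem
  rw [hkey, pvMembers_length]
  constructor <;> intro h <;> linarith

theorem pvColorsOk (k : Int) (config : List Int)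
    (hbad : config.any (fun c => decide (c < 0) || decide (k ≤ c)) = false) :
    ∀ c ∈ config, 0 ≤ c ∧ c < k := by
  intro c hc
  have := List.any_eq_false.mp hbad c hc
  simp at this
  omega

theorem pvA_iff (edges : List (Int × Int)) (k : Int) (config : List Int)
    (hbad : config.any (fun c => decide (c < 0) || decide (k ≤ c)) = false) :
    is_valid_clique_partition (config.length : Int) edges k config = true ↔
      ∀ g : Int, 0 ≤ g → g < k →
        (pvMembers config g).Pairwise (fun a b => (min a b, max a b) ∈ pvNorm edges) := by
  unfold is_valid_clique_partition
  rw [if_neg (by simp), if_neg (by simp [hbad])]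
  have hes : edges.foldl (fun s e => PySem.Set.add s (min e.1 e.2, max e.1 e.2)) PySem.Set.empty
      = PySem.Set.ofList (pvNorm edges) := by
    rw [PySem.Set.ofList_eq_foldl, pvNorm, List.foldl_map]
    rfl
  simp only [hes]
  rw [List.all_eq_true]
  constructor
  · intro H g hg0 hgk
    have h := H g (by rw [PySem.List.mem_pyRange_one]; exact ⟨hg0, hgk⟩)
    have h2 := (pvAllPairs_iff (pvMembers config g)
      (fun u v => PySem.Set.contains (PySem.Set.ofList (pvNorm edges)) (min u v, max u v))).1 h
    exact h2.imp (fun hr => (PySem.Set.mem_ofList _ _).1 ((PySem.Set.contains_iff _ _).1 hr))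
  · intro H g hg
    rw [PySem.List.mem_pyRange_one] at hg
    exact (pvAllPairs_iff (pvMembers config g)
      (fun u v => PySem.Set.contains (PySem.Set.ofList (pvNorm edges)) (min u v, max u v))).2
      ((H g hg.1 hg.2).imp
        (fun hr => (PySem.Set.contains_iff _ _).2 ((PySem.Set.mem_ofList _ _).2 hr)))

theorem pvB_iff (edges : List (Int × Int)) (k : Int) (config : List Int)
    (hbad : config.any (fun c => decide (c < 0) || decide (k ≤ c)) = false) :
    is_valid_clique_partition_alt (config.length : Int) edges k config = true ↔
      ∀ c ∈ config,
        (((pvIntra (config.length : Int) config edges).filter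
            (fun x => PySem.List.pyGetD config x.1 0 == c)).length : Int) * 2
          = (config.count c : Int) * ((config.count c : Int) - 1) := by
  unfold is_valid_clique_partition_alt
  rw [if_neg (by simp), if_neg (by simp [hbad])]
  simp only [PySem.Dict.foldl_insert_getD_add_one_eq_counter, PySem.Dict.items_counter,
    pvCountsEq, PySem.Dict.getD_counter, pvCountMap]
  rw [List.all_eq_true]
  constructor
  · intro H c hc
    have h := H (c, (config.count c : Int))
      (List.mem_map.2 ⟨c, (PySem.Set.mem_ofList config c).2 hc, rfl⟩)
    exact beq_iff_eq.1 h
  · intro H cs hcs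
    rcases List.mem_map.1 hcs with ⟨c, hc, rfl⟩
    exact beq_iff_eq.2 (H c ((PySem.Set.mem_ofList config c).1 hc))

theorem is_valid_clique_partition_spec : Claim_equal_is_valid_clique_partition := by
  intro n edges k config _
  unfold Spec_is_valid_clique_partition
  by_cases hlen : (config.length : Int) = n
  · subst hlen
    cases hbad : config.any (fun c => decide (c < 0) || decide (k ≤ c)) with
    | true => simp [is_valid_clique_partition, is_valid_clique_partition_alt, hbad]
    | false =>
      rw [Bool.eq_iff_iff, pvA_iff edges k config hbad, pvB_iff edges k config hbad]
      have hcolors := pvColorsOk k config hbad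
      constructor
      · intro hA c hc
        obtain ⟨h0, hk⟩ := hcolors c hc
        exact (pvPerColor config edges c).1 (hA c h0 hk)
      · intro hB g h0 hk
        by_cases hg : g ∈ config
        · exact (pvPerColor config edges g).2 (hB g hg)
        · have hempty : pvMembers config g = [] := by
            rw [List.eq_nil_iff_forall_not_mem]
            intro v hv
            obtain ⟨hv0, hv1, hvc⟩ := (pvMembers_mem config g v).1 hv
            have hmemcfg : pvCol config v ∈ config := by
              apply PySem.List.pyGetD_mem
              simp [PySem.Raise.InRange]
              omega
            rw [hvc] at hmemcfg
            exact hg hmemcfg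
          rw [hempty]
          exact List.Pairwise.nil
  · simp [is_valid_clique_partition, is_valid_clique_partition_alt, hlen]
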